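-- pv_equiv track=rewrite | github.com/touzet/pampa | src/markers.py | authorized_PTM
-- ===== SOURCE A (Python) =====
-- def authorized_PTM(PTM_string, list_of_PTM):
--     found_number=""
--     for char in PTM_string:
--         if char.isdigit():
--             found_number += char
--         else:
--           if int(found_number)>0 and char not in list_of_PTM:
--             return False
--           found_number=""
--
--     return True
-- ===== SOURCE B (Python) =====
-- def authorized_PTM(PTM_string, list_of_PTM):
--     allowed = set(list_of_PTM)
--     # pass 1: cut the string into (digit_run, following_char) segments; no int() here
--     segments = []
--     num = ""
--     for ch in PTM_string:
--         if ch.isdigit():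
--             num += ch
--         else:
--             segments.append((num, ch))
--             num = ""
--     # pass 2: every positively-counted segment must carry an allowed PTM character
--     return all(int(n) <= 0 or c in allowed for n, c in segments)
-- ===== Notes on version B (the rewrite author's own statement) =====
-- stated objective: alternative
-- what changed: B splits validation into two passes: first cut PTM_string into (digit-run, char) segments without calling int(), then check with a short-circuiting all() that every segment with a positive count has its char in a set built once from list_of_PTM; A interleaves int() conversion, membership test and early return inside one char loop.
-- outside the precondition, e.g. on authorized_PTM('1xy', []): A returns False, B returns False
import Mathlib
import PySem

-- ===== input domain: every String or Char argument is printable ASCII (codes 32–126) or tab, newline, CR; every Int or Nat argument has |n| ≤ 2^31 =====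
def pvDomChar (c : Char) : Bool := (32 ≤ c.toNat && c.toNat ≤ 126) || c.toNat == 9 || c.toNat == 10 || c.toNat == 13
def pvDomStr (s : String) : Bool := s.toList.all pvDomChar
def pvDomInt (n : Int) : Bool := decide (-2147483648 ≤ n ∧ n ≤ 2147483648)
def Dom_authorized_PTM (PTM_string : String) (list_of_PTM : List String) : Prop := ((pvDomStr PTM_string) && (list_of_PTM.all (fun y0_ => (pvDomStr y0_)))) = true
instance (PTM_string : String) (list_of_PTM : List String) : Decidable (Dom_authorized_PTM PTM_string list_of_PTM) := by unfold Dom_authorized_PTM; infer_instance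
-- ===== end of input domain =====

-- B restates the validation as: split into (digit-run, char) segments first, then check all segments; alternative decomposition, not faster.


-- ===== PORT A =====
-- A's for-loop over the characters with the running accumulator `found_number`;
-- `int(found_number)` is PySem.Int.ofStr? (none = ValueError, excluded by Pre_; .getD 0 is never reached inside Pre_).
def authorized_PTM_goA (list_of_PTM : List String) : List Char → String → Bool
  | [], _ => true
  | c :: rest, found_number =>
    if PySem.Chars.isdigit c then
      authorized_PTM_goA list_of_PTM rest (found_number.push c)
    else
      if decide ((PySem.Int.ofStr? found_number).getD 0 > 0) && !(list_of_PTM.contains (String.singleton c)) then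
        false
      else
        authorized_PTM_goA list_of_PTM rest ""

def authorized_PTM (PTM_string : String) (list_of_PTM : List String) : Bool :=
  authorized_PTM_goA list_of_PTM PTM_string.toList ""

-- ===== PORT B =====
-- pass 1 of Source B: cut the string into (digit_run, following_char) segments
def authorized_PTM_segs : List Char → String → List (String × Char)
  | [], _ => []
  | c :: rest, num =>
    if PySem.Chars.isdigit c then
      authorized_PTM_segs rest (num.push c)
    else
      (num, c) :: authorized_PTM_segs rest ""

-- pass 2 of Source B: all(int(n) <= 0 or c in allowed for n, c in segments); int("") raises (excluded by Pre_), so .getD 0 is never reached inside Pre_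
def authorized_PTM_alt (PTM_string : String) (list_of_PTM : List String) : Bool :=
  let allowed : PySem.Set String := PySem.Set.ofList list_of_PTM
  (authorized_PTM_segs PTM_string.toList "").all
    (fun p => decide ((PySem.Int.ofStr? p.1).getD 0 ≤ 0) || PySem.Set.contains allowed (String.singleton p.2))

-- ===== PRECONDITION & SPEC =====
-- Pre_ excludes exactly the inputs on which A may hit int("") (ValueError): a non-digit character
-- not immediately preceded by a digit. On some such inputs A still returns False early (before the
-- bad position); B returns the same False there — see claim.json cites.
def Pre_authorized_PTM (PTM_string : String) (list_of_PTM : List String) : Prop :=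
  (PTM_string.toList.head?.all PySem.Chars.isdigit
    && (PTM_string.toList.zip PTM_string.toList.tail).all
         (fun p => PySem.Chars.isdigit p.2 || PySem.Chars.isdigit p.1)) = true
instance (PTM_string : String) (list_of_PTM : List String) : Decidable (Pre_authorized_PTM PTM_string list_of_PTM) := by unfold Pre_authorized_PTM; infer_instance

def pvWitness_authorized_PTM : String × List String := ("2O1C", ["O", "C"])

def Spec_authorized_PTM (PTM_string : String) (list_of_PTM : List String) (out : Bool) : Prop := out = authorized_PTM_alt PTM_string list_of_PTM
instance (PTM_string : String) (list_of_PTM : List String) (out : Bool) : Decidable (Spec_authorized_PTM PTM_string list_of_PTM out) := by unfold Spec_authorized_PTM; infer_instance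

-- ===== CLAIM (what is proved, stated in full; the proofs are below) =====
def Claim_equal_authorized_PTM : Prop := ∀ (PTM_string : String) (list_of_PTM : List String), Dom_authorized_PTM PTM_string list_of_PTM → Pre_authorized_PTM PTM_string list_of_PTM → Spec_authorized_PTM PTM_string list_of_PTM (authorized_PTM PTM_string list_of_PTM)

-- ===== LEMMAS AND PROOFS =====

lemma authorized_PTM_pred_eq (found : String) (m : Bool) :
    (decide ((PySem.Int.ofStr? found).getD 0 ≤ 0) || m)
      = !(decide ((PySem.Int.ofStr? found).getD 0 > 0) && !m) := by
  cases m
  · by_cases hk : (PySem.Int.ofStr? found).getD 0 ≤ 0 <;> simp [hk] <;> omega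
  · simp

lemma authorized_PTM_go_eq (list_of_PTM : List String) :
    ∀ (cs : List Char) (found : String),
      authorized_PTM_goA list_of_PTM cs found
        = (authorized_PTM_segs cs found).all
            (fun p => decide ((PySem.Int.ofStr? p.1).getD 0 ≤ 0)
                || PySem.Set.contains (PySem.Set.ofList list_of_PTM) (String.singleton p.2)) := by
  intro cs
  induction cs with
  | nil => intro found; simp [authorized_PTM_goA, authorized_PTM_segs]
  | cons c rest ih =>
    intro found
    by_cases hd : PySem.Chars.isdigit c
    · simp [authorized_PTM_goA, authorized_PTM_segs, hd, ih]
    · rw [Bool.not_eq_true] at hd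
      have hm : PySem.Set.contains (PySem.Set.ofList list_of_PTM) (String.singleton c)
          = list_of_PTM.contains (String.singleton c) := by
        simp only [PySem.Set.contains, List.contains_eq_mem, PySem.Set.mem_ofList]
      simp only [authorized_PTM_goA, authorized_PTM_segs, hd, Bool.false_eq_true, if_false,
        List.all_cons, ih]
      rw [hm, authorized_PTM_pred_eq found (list_of_PTM.contains (String.singleton c))]
      cases hcond : (decide ((PySem.Int.ofStr? found).getD 0 > 0)
          && !list_of_PTM.contains (String.singleton c)) <;> simp [hcond]

-- ===== VERDICT (by name: the statement is the Claim_ definition above) =====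
theorem authorized_PTM_spec : Claim_equal_authorized_PTM := by
  intro s lst _ _
  unfold Spec_authorized_PTM authorized_PTM authorized_PTM_alt
  exact authorized_PTM_go_eq lst s.toList ""
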